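-- pv_equiv track=rewrite | github.com/fuyunwang/Algoinbilibili | PythonCodes/leetcode/Code1905.py | countSubIslands
-- ===== SOURCE A (Python) =====
-- from typing import List
--
-- def countSubIslands(grid1: List[List[int]], grid2: List[List[int]]) -> int:
--     m = len(grid2)
--     n = len(grid2[0])
--
--     def dfs(grid,x,y,matrix):
--         if x>=m or x<0 or y>=n or y<0 or grid[x][y]!=1:
--             return True
--         if matrix[x][y]!=1:
--             return False
--         grid2[x][y]=-1
--         a = dfs(grid,x+1,y,matrix)
--         b = dfs(grid,x,y+1,matrix)
--         c = dfs(grid,x,y-1,matrix)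
--         d = dfs(grid,x-1,y,matrix)
--         return a and b and c and d
--
--     ans = 0
--     for i in range(0,m):
--         for j in range(0,n):
--             if grid2[i][j]==1 and dfs(grid2,i,j,grid1):
--                 ans = ans+1
--     return ans
-- ===== SOURCE B (Python) =====
-- def countSubIslands(grid1, grid2):
--     m = len(grid2)
--     n = len(grid2[0])
--
--     def absorb(stack, ok):
--         # iterative flood fill; grid1-failing cells flip ok but are neither marked nor expanded
--         while stack:
--             x, y = stack.pop()
--             if 0 <= x < m and 0 <= y < n and grid2[x][y] == 1:
--                 if grid1[x][y] == 1:
--                     grid2[x][y] = -1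
--                     stack.extend(((x - 1, y), (x, y - 1), (x, y + 1), (x + 1, y)))
--                 else:
--                     ok = False
--         return ok
--
--     total = 0
--     for idx in range(m * n):
--         i, j = divmod(idx, n)
--         if grid2[i][j] == 1 and absorb([(i, j)], True):
--             total += 1
--     return total
-- ===== Notes on version B (the rewrite author's own statement) =====
-- stated objective: alternative
-- what changed: A's recursive four-way dfs per start cell is replaced by an iterative explicit-stack flood-fill helper with an ok accumulator, driven by a single flat loop over cell indices (divmod) instead of nested row/column loops.
import Mathlib
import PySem

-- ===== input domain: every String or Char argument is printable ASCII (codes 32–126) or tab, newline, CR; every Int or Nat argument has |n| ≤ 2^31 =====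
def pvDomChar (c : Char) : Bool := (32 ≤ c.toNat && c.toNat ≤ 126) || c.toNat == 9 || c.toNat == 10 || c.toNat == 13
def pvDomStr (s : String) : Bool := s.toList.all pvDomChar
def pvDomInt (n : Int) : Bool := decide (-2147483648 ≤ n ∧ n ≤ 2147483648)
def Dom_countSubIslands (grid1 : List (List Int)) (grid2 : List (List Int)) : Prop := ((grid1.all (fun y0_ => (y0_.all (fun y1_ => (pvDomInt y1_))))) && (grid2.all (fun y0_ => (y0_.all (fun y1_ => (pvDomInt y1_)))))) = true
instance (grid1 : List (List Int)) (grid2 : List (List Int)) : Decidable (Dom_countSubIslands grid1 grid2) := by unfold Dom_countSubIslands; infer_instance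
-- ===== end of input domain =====

-- B replaces A's recursive dfs by an iterative explicit-stack flood fill driven by one flat index loop.
-- Both Pythons mutate grid2 in place identically; the equivalence proved here is about the return value.

-- ===== PORT A =====
-- A's grid[x][y] read / write (only reached with x,y ≥ 0 and in bounds)
def gCell (g : List (List Int)) (x y : Int) : Int := (g.getD x.toNat []).getD y.toNat 0

def gSet (g : List (List Int)) (x y v : Int) : List (List Int) :=
  g.set x.toNat ((g.getD x.toNat []).set y.toNat v)

-- total number of grid entries (sizes A's fuel, which is never exhausted)
def cells (g : List (List Int)) : Nat := (g.map List.length).sum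

-- literal port of A's recursive dfs; fuel only makes the recursion total, it never runs out
def dfsA (grid1 : List (List Int)) (m n : Nat) : Nat → List (List Int) → Int → Int → List (List Int) × Bool
  | 0, g, _, _ => (g, true)
  | f+1, g, x, y =>
    if (m : Int) ≤ x ∨ x < 0 ∨ (n : Int) ≤ y ∨ y < 0 ∨ gCell g x y ≠ 1 then (g, true)
    else if gCell grid1 x y ≠ 1 then (g, false)
    else
      let g0 := gSet g x y (-1)
      let p1 := dfsA grid1 m n f g0 (x+1) y
      let p2 := dfsA grid1 m n f p1.1 x (y+1)
      let p3 := dfsA grid1 m n f p2.1 x (y-1)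
      let p4 := dfsA grid1 m n f p3.1 (x-1) y
      (p4.1, p1.2 && p2.2 && p3.2 && p4.2)

def countSubIslands (grid1 : List (List Int)) (grid2 : List (List Int)) : Int :=
  let m := grid2.length
  let n := (grid2.headD []).length
  let F := cells grid2 + 1
  ((List.range m).foldl (fun (s : List (List Int) × Int) (i : Nat) =>
      (List.range n).foldl (fun (s : List (List Int) × Int) (j : Nat) =>
        if gCell s.1 (i : Int) (j : Int) = 1 then
          ((dfsA grid1 m n F s.1 (i : Int) (j : Int)).1,
           if (dfsA grid1 m n F s.1 (i : Int) (j : Int)).2 then s.2 + 1 else s.2)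
        else s) s) (grid2, (0 : Int))).2

-- ===== PORT B =====
-- B's grid2[p] read and in-place mark, on coordinate pairs
def cellB (g : List (List Int)) (p : Int × Int) : Int :=
  (g.getD p.1.toNat []).getD p.2.toNat 0

def markB (g : List (List Int)) (p : Int × Int) : List (List Int) :=
  g.set p.1.toNat ((g.getD p.1.toNat []).set p.2.toNat (-1))

-- literal port of B's while-stack helper 'absorb' (stack top = list head; Python's
-- stack.extend of the four neighbours followed by pops = prepending them reversed);
-- fuel only makes the loop total, it never runs out
def absorb (grid1 : List (List Int)) (m n : Nat) :
    Nat → List (Int × Int) → List (List Int) → Bool → List (List Int) × Bool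
  | 0, _, g, ok => (g, ok)
  | _+1, [], g, ok => (g, ok)
  | f+1, p :: rest, g, ok =>
    if 0 ≤ p.1 ∧ p.1 < (m : Int) ∧ 0 ≤ p.2 ∧ p.2 < (n : Int) ∧ cellB g p = 1 then
      if cellB grid1 p = 1 then
        absorb grid1 m n f
          ([(p.1 + 1, p.2), (p.1, p.2 + 1), (p.1, p.2 - 1), (p.1 - 1, p.2)] ++ rest)
          (markB g p) ok
      else
        absorb grid1 m n f rest g false
    else
      absorb grid1 m n f rest g ok

def countSubIslands_alt (grid1 : List (List Int)) (grid2 : List (List Int)) : Int :=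
  let m := grid2.length
  let n := (grid2.headD []).length
  let F := 4 * grid2.flatten.length + 2
  ((List.range (m * n)).foldl (fun (st : List (List Int) × Int) (idx : Nat) =>
      let q : Int × Int := ((idx / n : Nat), (idx % n : Nat))
      if cellB st.1 q = 1 then
        match absorb grid1 m n F [q] st.1 true with
        | (g', true)  => (g', st.2 + 1)
        | (g', false) => (g', st.2)
      else st) (grid2, (0 : Int))).2

-- ===== PRECONDITION & SPEC =====
-- Pre_ = exactly the inputs where Python A returns: grid2 non-empty (grid2[0] else raises IndexError),
-- every grid2 row at least n wide (the sweep reads grid2[i][j] for all j < n), and grid1 defined at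
-- every cell where grid2 holds a 1 (the only cells where A reads grid1); elsewhere A raises IndexError.
def Pre_countSubIslands (grid1 : List (List Int)) (grid2 : List (List Int)) : Prop :=
  grid2 ≠ [] ∧
  (∀ row ∈ grid2, (grid2.headD []).length ≤ row.length) ∧
  (∀ i < grid2.length, ∀ j < (grid2.headD []).length,
    (grid2.getD i []).getD j 0 = 1 → i < grid1.length ∧ j < (grid1.getD i []).length)

instance (grid1 : List (List Int)) (grid2 : List (List Int)) : Decidable (Pre_countSubIslands grid1 grid2) := by
  unfold Pre_countSubIslands; infer_instance

def pvWitness_countSubIslands : List (List Int) × List (List Int) :=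
  ([[1, 1], [0, 1]], [[1, 0], [0, 1]])

def Spec_countSubIslands (grid1 : List (List Int)) (grid2 : List (List Int)) (out : Int) : Prop := out = countSubIslands_alt grid1 grid2
instance (grid1 : List (List Int)) (grid2 : List (List Int)) (out : Int) : Decidable (Spec_countSubIslands grid1 grid2 out) := by unfold Spec_countSubIslands; infer_instance

-- ===== CLAIM (what is proved, stated in full; the proofs are below) =====
def Claim_equal_countSubIslands : Prop := ∀ (grid1 : List (List Int)) (grid2 : List (List Int)), Dom_countSubIslands grid1 grid2 → Pre_countSubIslands grid1 grid2 → Spec_countSubIslands grid1 grid2 (countSubIslands grid1 grid2)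

-- ===== LEMMAS AND PROOFS =====

-- B's pair-based cell read/write coincide with A's coordinate-based ones
theorem cellB_eq (g : List (List Int)) (x y : Int) : cellB g (x, y) = gCell g x y := rfl
theorem markB_eq (g : List (List Int)) (x y : Int) : markB g (x, y) = gSet g x y (-1) := rfl

-- number of 1-entries, the termination measure of both programs
def onesRow : List Int → Nat
  | [] => 0
  | a :: t => (if a = 1 then 1 else 0) + onesRow t

def ones : List (List Int) → Nat
  | [] => 0
  | r :: t => onesRow r + ones t

theorem onesRow_le_length : ∀ (row : List Int), onesRow row ≤ row.length := by
  intro row; induction row with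
  | nil => simp [onesRow]
  | cons a t ih => simp [onesRow]; split <;> omega

theorem ones_le_cells : ∀ (g : List (List Int)), ones g ≤ cells g := by
  intro g; induction g with
  | nil => simp [ones, cells]
  | cons r t ih =>
    have := onesRow_le_length r
    simp [ones, cells] at *; omega

theorem onesRow_set : ∀ (row : List Int) (k : Nat), row.getD k 0 = 1 →
    onesRow (row.set k (-1)) + 1 = onesRow row := by
  intro row; induction row with
  | nil => intro k h; simp at h
  | cons a t ih =>
    intro k h
    cases k with
    | zero => simp at h; simp [h, onesRow]; omega
    | succ k => simp at h; have := ih k h; simp [onesRow, List.set]; omega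

theorem ones_gSet : ∀ (g : List (List Int)) (x y : Int), gCell g x y = 1 →
    ones (gSet g x y (-1)) + 1 = ones g := by
  intro g
  suffices h : ∀ (g : List (List Int)) (i j : Nat), (g.getD i []).getD j 0 = 1 →
      ones (g.set i ((g.getD i []).set j (-1))) + 1 = ones g by
    intro x y hc; exact h g x.toNat y.toNat hc
  intro g; induction g with
  | nil => intro i j h; simp at h
  | cons r t ih =>
    intro i j h
    cases i with
    | zero =>
      simp at h
      have := onesRow_set r j h
      simp [ones]; omega
    | succ i =>
      simp [List.getD] at h
      have := ih i j (by simpa [List.getD] using h)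
      simp only [List.set, ones]
      simp [List.getD] at this ⊢
      omega

theorem gCell_one_pos : ∀ (g : List (List Int)) (x y : Int), gCell g x y = 1 → 1 ≤ ones g := by
  intro g x y h
  have := ones_gSet g x y h
  omega

theorem dfsA_ones_le : ∀ (grid1 : List (List Int)) (m n : Nat) (f : Nat) (g : List (List Int)) (x y : Int),
    ones (dfsA grid1 m n f g x y).1 ≤ ones g := by
  intro grid1 m n f
  induction f with
  | zero => intro g x y; simp [dfsA]
  | succ f ih =>
    intro g x y
    simp only [dfsA]
    split
    · simp
    · split
      · simp
      · rename_i h1 h2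
        push_neg at h1
        have hc : gCell g x y = 1 := h1.2.2.2.2
        have h0 := ones_gSet g x y hc
        have i1 := ih (gSet g x y (-1)) (x+1) y
        have i2 := ih (dfsA grid1 m n f (gSet g x y (-1)) (x+1) y).1 x (y+1)
        have i3 := ih (dfsA grid1 m n f (dfsA grid1 m n f (gSet g x y (-1)) (x+1) y).1 x (y+1)).1 x (y-1)
        have i4 := ih (dfsA grid1 m n f (dfsA grid1 m n f (dfsA grid1 m n f (gSet g x y (-1)) (x+1) y).1 x (y+1)).1 x (y-1)).1 (x-1) y
        simp only []
        omega

-- B's guard is the complement of A's guard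
theorem guard_compl (g : List (List Int)) (m n : Nat) (x y : Int) :
    (0 ≤ x ∧ x < (m : Int) ∧ 0 ≤ y ∧ y < (n : Int) ∧ cellB g (x, y) = 1)
    ↔ ¬ ((m : Int) ≤ x ∨ x < 0 ∨ (n : Int) ≤ y ∨ y < 0 ∨ gCell g x y ≠ 1) := by
  rw [cellB_eq]
  constructor
  · rintro ⟨h1, h2, h3, h4, h5⟩ h
    rcases h with h | h | h | h | h <;> first | omega | exact h h5
  · intro h
    push_neg at h
    exact ⟨by omega, by omega, by omega, by omega, h.2.2.2.2⟩

-- the result of B's loop does not depend on the (sufficient) fuel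
theorem absorb_irrel : ∀ (grid1 : List (List Int)) (m n : Nat) (μ : Nat)
    (g : List (List Int)) (stack : List (Int × Int)) (ok : Bool) (f f' : Nat),
    4 * ones g + stack.length ≤ μ → μ < f → μ < f' →
    absorb grid1 m n f stack g ok = absorb grid1 m n f' stack g ok := by
  intro grid1 m n μ
  induction μ with
  | zero =>
    intro g stack ok f f' hμ hf hf'
    have hs : stack = [] := by cases stack <;> simp at hμ ⊢
    subst hs
    cases f with
    | zero => omega
    | succ f => cases f' with
      | zero => omega
      | succ f' => simp [absorb]
  | succ μ ih =>
    intro g stack ok f f' hμ hf hf'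
    cases f with
    | zero => omega
    | succ f =>
    cases f' with
    | zero => omega
    | succ f' =>
    cases stack with
    | nil => simp [absorb]
    | cons p rest =>
      obtain ⟨x, y⟩ := p
      simp only [absorb]
      split
      · rename_i hb
        split
        · rw [markB_eq]
          have hc : gCell g x y = 1 := by rw [← cellB_eq]; exact hb.2.2.2.2
          have h0 := ones_gSet g x y hc
          exact ih (gSet g x y (-1)) _ ok f f' (by simp at hμ ⊢; omega) (by omega) (by omega)
        · exact ih g rest false f f' (by simp at hμ ⊢; omega) (by omega) (by omega)
      · exact ih g rest ok f f' (by simp at hμ ⊢; omega) (by omega) (by omega)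

-- core simulation: popping one cell off B's stack performs exactly A's dfs from that cell
theorem bridge : ∀ (grid1 : List (List Int)) (m n : Nat) (k : Nat)
    (g : List (List Int)) (x y : Int) (rest : List (Int × Int)) (ok : Bool) (f1 f2 f2' : Nat),
    ones g ≤ k → k < f1 → 4 * k + rest.length + 1 < f2 → 4 * k + rest.length < f2' →
    absorb grid1 m n f2 ((x, y) :: rest) g ok
      = absorb grid1 m n f2' rest (dfsA grid1 m n f1 g x y).1 (ok && (dfsA grid1 m n f1 g x y).2) := by
  intro grid1 m n k
  induction k with
  | zero =>
    intro g x y rest ok f1 f2 f2' hk hf1 hf2 hf2'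
    cases f1 with
    | zero => omega
    | succ a =>
    cases f2 with
    | zero => omega
    | succ b =>
    by_cases hg : (m : Int) ≤ x ∨ x < 0 ∨ (n : Int) ≤ y ∨ y < 0 ∨ gCell g x y ≠ 1
    · have hng : ¬ (0 ≤ x ∧ x < (m : Int) ∧ 0 ≤ y ∧ y < (n : Int) ∧ cellB g (x, y) = 1) := by
        rw [guard_compl]; exact not_not_intro hg
      simp only [dfsA, absorb, if_pos hg, if_neg hng, Bool.and_true]
      exact absorb_irrel grid1 m n rest.length g rest ok b f2' (by omega) (by omega) (by omega)
    · by_cases hm : gCell grid1 x y ≠ 1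
      · have hyg : (0 ≤ x ∧ x < (m : Int) ∧ 0 ≤ y ∧ y < (n : Int) ∧ cellB g (x, y) = 1) := by
          rw [guard_compl]; exact hg
        have hm' : ¬ cellB grid1 (x, y) = 1 := by rw [cellB_eq]; exact hm
        simp only [dfsA, absorb, if_neg hg, if_pos hm, if_pos hyg, if_neg hm', Bool.and_false]
        exact absorb_irrel grid1 m n rest.length g rest false b f2' (by omega) (by omega) (by omega)
      · push_neg at hg
        have hc : gCell g x y = 1 := hg.2.2.2.2
        have := gCell_one_pos g x y hc
        omega
  | succ k ih =>
    intro g x y rest ok f1 f2 f2' hk hf1 hf2 hf2'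
    cases f1 with
    | zero => omega
    | succ a =>
    cases f2 with
    | zero => omega
    | succ b =>
    by_cases hg : (m : Int) ≤ x ∨ x < 0 ∨ (n : Int) ≤ y ∨ y < 0 ∨ gCell g x y ≠ 1
    · have hng : ¬ (0 ≤ x ∧ x < (m : Int) ∧ 0 ≤ y ∧ y < (n : Int) ∧ cellB g (x, y) = 1) := by
        rw [guard_compl]; exact not_not_intro hg
      simp only [dfsA, absorb, if_pos hg, if_neg hng, Bool.and_true]
      exact absorb_irrel grid1 m n (4 * (k+1) + rest.length) g rest ok b f2' (by omega) (by omega) (by omega)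
    · by_cases hm : gCell grid1 x y ≠ 1
      · have hyg : (0 ≤ x ∧ x < (m : Int) ∧ 0 ≤ y ∧ y < (n : Int) ∧ cellB g (x, y) = 1) := by
          rw [guard_compl]; exact hg
        have hm' : ¬ cellB grid1 (x, y) = 1 := by rw [cellB_eq]; exact hm
        simp only [dfsA, absorb, if_neg hg, if_pos hm, if_pos hyg, if_neg hm', Bool.and_false]
        exact absorb_irrel grid1 m n (4 * (k+1) + rest.length) g rest false b f2' (by omega) (by omega) (by omega)
      · have hc : gCell g x y = 1 := by push_neg at hg; exact hg.2.2.2.2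
        have h0 := ones_gSet g x y hc
        have hyg : (0 ≤ x ∧ x < (m : Int) ∧ 0 ≤ y ∧ y < (n : Int) ∧ cellB g (x, y) = 1) := by
          rw [guard_compl]; exact hg
        have hm' : cellB grid1 (x, y) = 1 := by rw [cellB_eq]; push_neg at hm; exact hm
        simp only [dfsA, absorb, if_neg hg, if_pos hyg, if_pos hm', if_neg (by push_neg at hm ⊢; exact hm : ¬ gCell grid1 x y ≠ 1),
          List.cons_append, List.nil_append, markB_eq]
        set g0 := gSet g x y (-1) with hg0
        set p1 := dfsA grid1 m n a g0 (x+1) y with hp1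
        set p2 := dfsA grid1 m n a p1.1 x (y+1) with hp2
        set p3 := dfsA grid1 m n a p2.1 x (y-1) with hp3
        set p4 := dfsA grid1 m n a p3.1 (x-1) y with hp4
        have u1 : ones g0 ≤ k := by omega
        have u2 : ones p1.1 ≤ k := le_trans (by rw [hp1]; exact dfsA_ones_le grid1 m n a g0 (x+1) y) u1
        have u3 : ones p2.1 ≤ k := le_trans (by rw [hp2]; exact dfsA_ones_le grid1 m n a p1.1 x (y+1)) u2
        have u4 : ones p3.1 ≤ k := le_trans (by rw [hp3]; exact dfsA_ones_le grid1 m n a p2.1 x (y-1)) u3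
        have e1 := ih g0 (x+1) y ((x, y+1) :: (x, y-1) :: (x-1, y) :: rest) ok a b b
          u1 (by omega) (by simp; omega) (by simp; omega)
        have e2 := ih p1.1 x (y+1) ((x, y-1) :: (x-1, y) :: rest) (ok && p1.2) a b b
          u2 (by omega) (by simp; omega) (by simp; omega)
        have e3 := ih p2.1 x (y-1) ((x-1, y) :: rest) ((ok && p1.2) && p2.2) a b b
          u3 (by omega) (by simp; omega) (by simp; omega)
        have e4 := ih p3.1 (x-1) y rest (((ok && p1.2) && p2.2) && p3.2) a b f2'
          u4 (by omega) (by omega) (by omega)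
        rw [← hp1] at e1
        rw [← hp2] at e2
        rw [← hp3] at e3
        rw [← hp4] at e4
        calc absorb grid1 m n b ((x+1, y) :: (x, y+1) :: (x, y-1) :: (x-1, y) :: rest) g0 ok
            = absorb grid1 m n b ((x, y+1) :: (x, y-1) :: (x-1, y) :: rest) p1.1 (ok && p1.2) := e1
          _ = absorb grid1 m n b ((x, y-1) :: (x-1, y) :: rest) p2.1 ((ok && p1.2) && p2.2) := e2
          _ = absorb grid1 m n b ((x-1, y) :: rest) p3.1 (((ok && p1.2) && p2.2) && p3.2) := e3
          _ = absorb grid1 m n f2' rest p4.1 ((((ok && p1.2) && p2.2) && p3.2) && p4.2) := e4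
          _ = absorb grid1 m n f2' rest p4.1 (ok && (p1.2 && p2.2 && p3.2 && p4.2)) := by
              simp [Bool.and_assoc]

-- one start cell: A's step equals B's step
theorem step_eq (grid1 : List (List Int)) (m n K : Nat) (g : List (List Int)) (x y : Int) (ans : Int)
    (hK : ones g ≤ K) :
    (if gCell g x y = 1 then
       ((dfsA grid1 m n (K+1) g x y).1,
        if (dfsA grid1 m n (K+1) g x y).2 then ans + 1 else ans)
     else (g, ans))
    = (if cellB g (x, y) = 1 then
       (match absorb grid1 m n (4*K+2) [(x, y)] g true with
        | (g', true)  => (g', ans + 1)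
        | (g', false) => (g', ans))
     else (g, ans)) := by
  rw [cellB_eq]
  by_cases hc : gCell g x y = 1
  · simp only [if_pos hc]
    have hb := bridge grid1 m n K g x y [] true (K+1) (4*K+2) (4*K+1)
      hK (by omega) (by simp) (by simp)
    have hnil : absorb grid1 m n (4*K+1) [] (dfsA grid1 m n (K+1) g x y).1
        (true && (dfsA grid1 m n (K+1) g x y).2)
        = ((dfsA grid1 m n (K+1) g x y).1, true && (dfsA grid1 m n (K+1) g x y).2) := by
      cases h4 : (4*K+1) with
      | zero => omega
      | succ t => simp [absorb]
    rw [hnil] at hb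
    simp only [Bool.true_and] at hb
    rw [hb]
    cases hr : (dfsA grid1 m n (K+1) g x y).2 <;> simp
  · simp [if_neg hc]

-- flattening: a fold over range (m*n) with divmod coordinates is the nested fold
theorem foldl_range_mul {α : Type} (F : α → Nat → Nat → α) (m n : Nat) (s : α) :
    (List.range (m * n)).foldl (fun s idx => F s (idx / n) (idx % n)) s
    = (List.range m).foldl (fun s i => (List.range n).foldl (fun s j => F s i j) s) s := by
  induction m generalizing s with
  | zero => simp
  | succ m ih =>
    rcases Nat.eq_zero_or_pos n with hn | hn
    · subst hn
      simp only [Nat.mul_zero, List.range_zero, List.foldl_nil]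
      clear ih
      induction m with
      | zero => simp
      | succ m ihm => rw [List.range_succ, List.foldl_append, ihm]; simp
    · have hmn : (m + 1) * n = m * n + n := by ring
      rw [hmn, List.range_add, List.foldl_append, ih, List.range_succ, List.foldl_append]
      simp only [List.foldl_map, List.foldl_cons, List.foldl_nil]
      have h2 : ∀ (js : List Nat) (s : α), (∀ j ∈ js, j < n) →
          js.foldl (fun s j => F s ((m * n + j) / n) ((m * n + j) % n)) s
          = js.foldl (fun s j => F s m j) s := by
        intro js
        induction js with
        | nil => intro s _; rfl
        | cons j js ihj =>
          intro s hj
          have hjn : j < n := hj j (by simp)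
          have hd : (m * n + j) / n = m := by
            rw [Nat.mul_comm m n, Nat.mul_add_div hn, Nat.div_eq_of_lt hjn]
            omega
          have hm : (m * n + j) % n = j := by
            rw [Nat.mul_comm m n, Nat.mul_add_mod, Nat.mod_eq_of_lt hjn]
          simp only [List.foldl_cons, hd, hm]
          exact ihj _ (fun a ha => hj a (by simp [ha]))
      exact h2 (List.range n) _ (by intro j hj; exact List.mem_range.mp hj)

-- the invariant fold: A's nested sweep equals B's nested sweep (after flattening)
theorem inner_eq (grid1 : List (List Int)) (m n K : Nat) (i : Nat) :
    ∀ (js : List Nat) (s : List (List Int) × Int), ones s.1 ≤ K →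
    (js.foldl (fun (s : List (List Int) × Int) (j : Nat) =>
        if gCell s.1 (i : Int) (j : Int) = 1 then
          ((dfsA grid1 m n (K+1) s.1 (i : Int) (j : Int)).1,
           if (dfsA grid1 m n (K+1) s.1 (i : Int) (j : Int)).2 then s.2 + 1 else s.2)
        else s) s
      = js.foldl (fun (s : List (List Int) × Int) (j : Nat) =>
        if cellB s.1 ((i : Int), (j : Int)) = 1 then
          (match absorb grid1 m n (4*K+2) [((i : Int), (j : Int))] s.1 true with
           | (g', true)  => (g', s.2 + 1)
           | (g', false) => (g', s.2))
        else s) s)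
    ∧ ones (js.foldl (fun (s : List (List Int) × Int) (j : Nat) =>
        if gCell s.1 (i : Int) (j : Int) = 1 then
          ((dfsA grid1 m n (K+1) s.1 (i : Int) (j : Int)).1,
           if (dfsA grid1 m n (K+1) s.1 (i : Int) (j : Int)).2 then s.2 + 1 else s.2)
        else s) s).1 ≤ K := by
  intro js
  induction js with
  | nil => intro s hs; exact ⟨rfl, hs⟩
  | cons j js ihj =>
    intro s hs
    have hstep := step_eq grid1 m n K s.1 (i : Int) (j : Int) s.2 hs
    have hinv : ones (if gCell s.1 (i : Int) (j : Int) = 1 then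
        ((dfsA grid1 m n (K+1) s.1 (i : Int) (j : Int)).1,
         if (dfsA grid1 m n (K+1) s.1 (i : Int) (j : Int)).2 then s.2 + 1 else s.2)
      else s).1 ≤ K := by
      by_cases hc : gCell s.1 (i : Int) (j : Int) = 1
      · simp only [if_pos hc]
        exact le_trans (dfsA_ones_le grid1 m n (K+1) s.1 (i : Int) (j : Int)) hs
      · simpa [if_neg hc] using hs
    have hrec := ihj _ hinv
    constructor
    · simp only [List.foldl_cons]
      rw [← hstep]
      exact hrec.1
    · simp only [List.foldl_cons]
      exact hrec.2

theorem outer_eq (grid1 : List (List Int)) (m n K : Nat) :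
    ∀ (is : List Nat) (s : List (List Int) × Int), ones s.1 ≤ K →
    (is.foldl (fun (s : List (List Int) × Int) (i : Nat) =>
        (List.range n).foldl (fun (s : List (List Int) × Int) (j : Nat) =>
        if gCell s.1 (i : Int) (j : Int) = 1 then
          ((dfsA grid1 m n (K+1) s.1 (i : Int) (j : Int)).1,
           if (dfsA grid1 m n (K+1) s.1 (i : Int) (j : Int)).2 then s.2 + 1 else s.2)
        else s) s) s
      = is.foldl (fun (s : List (List Int) × Int) (i : Nat) =>
        (List.range n).foldl (fun (s : List (List Int) × Int) (j : Nat) =>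
        if cellB s.1 ((i : Int), (j : Int)) = 1 then
          (match absorb grid1 m n (4*K+2) [((i : Int), (j : Int))] s.1 true with
           | (g', true)  => (g', s.2 + 1)
           | (g', false) => (g', s.2))
        else s) s) s) := by
  intro is
  induction is with
  | nil => intro s hs; rfl
  | cons i is ihi =>
    intro s hs
    have h := inner_eq grid1 m n K i (List.range n) s hs
    simp only [List.foldl_cons]
    rw [← h.1]
    exact ihi _ h.2

-- ===== VERDICT (by name: the statement is the Claim_ definition above) =====
theorem countSubIslands_spec : Claim_equal_countSubIslands := by
  intro grid1 grid2 _ _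
  unfold Spec_countSubIslands
  have hK : grid2.flatten.length = cells grid2 := by
    simp [cells, List.length_flatten]
  have hflat := foldl_range_mul
    (fun (st : List (List Int) × Int) (i j : Nat) =>
      if cellB st.1 ((i : Int), (j : Int)) = 1 then
        (match absorb grid1 grid2.length (grid2.headD []).length (4 * cells grid2 + 2)
            [((i : Int), (j : Int))] st.1 true with
         | (g', true)  => (g', st.2 + 1)
         | (g', false) => (g', st.2))
      else st)
    grid2.length (grid2.headD []).length (grid2, (0 : Int))
  have h := outer_eq grid1 grid2.length (grid2.headD []).length (cells grid2)
    (List.range grid2.length) (grid2, (0 : Int)) (ones_le_cells grid2)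
  simp only [countSubIslands, countSubIslands_alt, hK]
  rw [hflat] at *
  rw [h]
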